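-- pv_equiv track=rewrite | github.com/seacow-technology/agentos | octopusos/core/communication/priority/priority_scoring.py | _score_source_type
-- ===== SOURCE A (Python) =====
-- from enum import Enum
-- from typing import Dict, List, Optional
--
-- class PriorityReason(str, Enum):
--     """Enumeration of priority scoring reasons.
--
--     These describe WHY a result received its score,
--     for transparency and auditability.
--     """
--
--     # Domain-based reasons
--     GOV_DOMAIN = "gov_domain"                    # .gov or .gov.au domain
--     EDU_DOMAIN = "edu_domain"                    # .edu domain
--     ORG_DOMAIN = "org_domain"                    # .org domain
--     OTHER_DOMAIN = "other_domain"                # Other domains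
--
--     # Source type reasons
--     OFFICIAL_POLICY_SOURCE = "official_policy"   # On official policy whitelist
--     RECOGNIZED_NGO = "recognized_ngo"            # On recognized NGO whitelist
--     GENERAL_SOURCE = "general_source"            # Not on any whitelist
--
--     # Document type reasons
--     PDF_DOCUMENT = "pdf_document"                # URL points to PDF
--     POLICY_PATH = "policy_path"                  # URL contains policy/legislation path
--     BLOG_OPINION = "blog_opinion"                # URL contains blog/opinion path
--     GENERAL_DOCUMENT = "general_document"        # Other document types
--
--     # Recency reasons
--     CURRENT_YEAR = "current_year"                # Published this year
--     RECENT_YEAR = "recent_year"                  # Published last year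
--     NO_DATE_INFO = "no_date_info"                # No date information found
--
-- def _score_source_type(
--     domain: str,
--     official_policy_sources: List[str],
--     recognized_ngos: List[str]
-- ) -> tuple[int, PriorityReason]:
--     """Score based on source type classification.
--
--     Scoring rules:
--     - Official policy source (whitelist) → 30 points
--     - Recognized NGO (whitelist) → 20 points
--     - Other → 5 points
--
--     Args:
--         domain: Domain name
--         official_policy_sources: List of official policy domains
--         recognized_ngos: List of recognized NGO domains
--
--     Returns:
--         Tuple of (score, reason)
--     """
--     # Check if domain matches official policy sources
--     for source in official_policy_sources:
--         if domain == source or domain.endswith(f".{source}"):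
--             return (30, PriorityReason.OFFICIAL_POLICY_SOURCE)
--
--     # Check if domain matches recognized NGOs
--     for ngo in recognized_ngos:
--         if domain == ngo or domain.endswith(f".{ngo}"):
--             return (20, PriorityReason.RECOGNIZED_NGO)
--
--     # Default score for other sources
--     return (5, PriorityReason.GENERAL_SOURCE)
-- ===== SOURCE B (Python) =====
-- from enum import Enum
--
-- class PriorityReason(str, Enum):
--     OFFICIAL_POLICY_SOURCE = "official_policy"
--     RECOGNIZED_NGO = "recognized_ngo"
--     GENERAL_SOURCE = "general_source"
--
-- def _score_source_type(domain, official_policy_sources, recognized_ngos):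
--     # All keys a whitelist entry may equal: the domain itself, plus every
--     # suffix of the domain that starts right after a '.'.
--     keys = {domain}
--     for i, ch in enumerate(domain):
--         if ch == '.':
--             keys.add(domain[i + 1:])
--     if not keys.isdisjoint(official_policy_sources):
--         return (30, PriorityReason.OFFICIAL_POLICY_SOURCE)
--     if not keys.isdisjoint(recognized_ngos):
--         return (20, PriorityReason.RECOGNIZED_NGO)
--     return (5, PriorityReason.GENERAL_SOURCE)
-- ===== Notes on version B (the rewrite author's own statement) =====
-- stated objective: alternative
-- what changed: Instead of scanning each whitelist with a per-entry endswith test, B precomputes once the set of the domain's matching keys (the domain and every suffix starting after a dot) and replaces both loops with a set-disjointness check against each whitelist.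
import Mathlib
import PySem

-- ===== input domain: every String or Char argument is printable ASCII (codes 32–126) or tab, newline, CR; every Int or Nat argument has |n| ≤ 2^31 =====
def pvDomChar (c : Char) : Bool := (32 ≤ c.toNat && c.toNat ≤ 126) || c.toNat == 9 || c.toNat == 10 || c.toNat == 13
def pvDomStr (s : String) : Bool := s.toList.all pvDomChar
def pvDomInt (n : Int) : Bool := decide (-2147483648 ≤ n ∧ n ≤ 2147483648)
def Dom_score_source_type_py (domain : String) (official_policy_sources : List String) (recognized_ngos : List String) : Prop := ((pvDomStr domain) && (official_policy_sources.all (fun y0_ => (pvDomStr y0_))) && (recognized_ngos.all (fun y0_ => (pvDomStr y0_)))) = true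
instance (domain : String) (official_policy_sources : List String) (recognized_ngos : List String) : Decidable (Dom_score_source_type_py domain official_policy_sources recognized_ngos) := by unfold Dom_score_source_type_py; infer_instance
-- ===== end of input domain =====

-- B replaces the two endswith-scans by one precomputed key set (the domain and every
-- suffix starting after a dot) intersected with each whitelist; alternative structure, not claimed faster.

-- ===== PORT A =====
-- first whitelist entry matching `domain == source or domain.endswith("." + source)` (A's for-loop)
def pvFindMatch (domain : String) : List String → Option String
  | [] => none
  | s :: rest =>
    if domain == s || PySem.Str.endswith domain ("." ++ s) then some s
    else pvFindMatch domain rest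

def score_source_type_py (domain : String) (official_policy_sources : List String) (recognized_ngos : List String) : Int × String :=
  match pvFindMatch domain official_policy_sources with
  | some _ => (30, "official_policy")
  | none =>
    match pvFindMatch domain recognized_ngos with
    | some _ => (20, "recognized_ngo")
    | none => (5, "general_source")

-- ===== PORT B =====
-- the suffixes of cs that start immediately after a '.' (Source B's enumerate loop)
def pvDotSuffixes : List Char → List (List Char)
  | [] => []
  | c :: rest => if c = '.' then rest :: pvDotSuffixes rest else pvDotSuffixes rest

def score_source_type_py_alt (domain : String) (official_policy_sources : List String) (recognized_ngos : List String) : Int × String :=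
  let keys : List (List Char) := domain.toList :: pvDotSuffixes domain.toList
  if official_policy_sources.any (fun s => keys.contains s.toList) then (30, "official_policy")
  else if recognized_ngos.any (fun s => keys.contains s.toList) then (20, "recognized_ngo")
  else (5, "general_source")

-- ===== PRECONDITION & SPEC =====
def Spec_score_source_type_py (domain : String) (official_policy_sources : List String) (recognized_ngos : List String) (out : Int × String) : Prop := out = score_source_type_py_alt domain official_policy_sources recognized_ngos
instance (domain : String) (official_policy_sources : List String) (recognized_ngos : List String) (out : Int × String) : Decidable (Spec_score_source_type_py domain official_policy_sources recognized_ngos out) := by unfold Spec_score_source_type_py; infer_instance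

-- ===== CLAIM (what is proved, stated in full; the proofs are below) =====
def Claim_equal_score_source_type_py : Prop := ∀ (domain : String) (official_policy_sources : List String) (recognized_ngos : List String), Dom_score_source_type_py domain official_policy_sources recognized_ngos → Spec_score_source_type_py domain official_policy_sources recognized_ngos (score_source_type_py domain official_policy_sources recognized_ngos)

-- ===== LEMMAS AND PROOFS =====

-- ===== VERDICT (by name: the statement is the Claim_ definition above) =====
-- '.'-prefixed suffixes of cs are exactly the dot-suffixes
theorem mem_pvDotSuffixes_iff (cs t : List Char) :
    t ∈ pvDotSuffixes cs ↔ ('.' :: t) <:+ cs := by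
  induction cs with
  | nil => simp [pvDotSuffixes]
  | cons c rest ih =>
    by_cases hc : c = '.' <;>
      simp only [pvDotSuffixes, List.suffix_cons_iff, hc, if_true, if_false,
        List.mem_cons, ih, List.cons.injEq] <;> aesop

theorem match_iff_key (domain s : String) :
    (domain == s || PySem.Str.endswith domain ("." ++ s)) = true ↔
      s.toList ∈ (domain.toList :: pvDotSuffixes domain.toList) := by
  simp only [Bool.or_eq_true, beq_iff_eq, PySem.Str.endswith_eq,
    PySem.Chars.endswith_iff, List.mem_cons, mem_pvDotSuffixes_iff,
    ← String.toList_inj]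
  constructor <;> rintro (h | h)
  · exact Or.inl h.symm
  · exact Or.inr (by simpa using h)
  · exact Or.inl h.symm
  · exact Or.inr (by simpa using h)

theorem find_isSome_iff_any (domain : String) (l : List String) :
    (pvFindMatch domain l).isSome =
      l.any (fun s => (domain.toList :: pvDotSuffixes domain.toList).contains s.toList) := by
  induction l with
  | nil => simp [pvFindMatch]
  | cons s rest ih =>
    unfold pvFindMatch
    split_ifs with h
    · have hk : ((domain.toList :: pvDotSuffixes domain.toList).contains s.toList) = true :=
        List.contains_iff_mem.mpr ((match_iff_key domain s).mp h)
      simp only [List.any_cons, hk, Bool.true_or, Option.isSome_some]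
    · have hk : ((domain.toList :: pvDotSuffixes domain.toList).contains s.toList) = false := by
        rw [← Bool.not_eq_true, List.contains_iff_mem]
        exact fun hm => h ((match_iff_key domain s).mpr hm)
      simp only [List.any_cons, hk, Bool.false_or]
      exact ih

theorem score_source_type_py_spec : Claim_equal_score_source_type_py := by
  intro domain off ngos _
  unfold Spec_score_source_type_py score_source_type_py score_source_type_py_alt
  have h1 := find_isSome_iff_any domain off
  have h2 := find_isSome_iff_any domain ngos
  cases hf : pvFindMatch domain off with
  | some v =>
    rw [hf] at h1
    simp only [Option.isSome_some] at h1
    rw [if_pos h1.symm]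
  | none =>
    rw [hf] at h1
    simp only [Option.isSome_none] at h1
    rw [if_neg (by rw [← h1]; exact Bool.false_ne_true)]
    cases hg : pvFindMatch domain ngos with
    | some v =>
      rw [hg] at h2
      simp only [Option.isSome_some] at h2
      rw [if_pos h2.symm]
    | none =>
      rw [hg] at h2
      simp only [Option.isSome_none] at h2
      rw [if_neg (by rw [← h2]; exact Bool.false_ne_true)]
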